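-- pv_equiv track=rewrite | github.com/daalgi/algorithms | arrays/remove_all_1s_with_flips.py | row_patterns
-- ===== SOURCE A (Python) =====
-- from typing import List
--
-- def row_patterns(grid: List[List[int]]) -> bool:
--     # Time complexity: O(rows * cols)
--     # Space complexity: O(cols)
--
--     # Notes:
--     # - It only makes sense to flip a row (or a col) no more than once.
--     # - If all the rows are equal, we can flip the columns with 1s
--     # to achieve a matrix full of 0s.
--     # - If all the cols are equal, we can flip the rows with 1s
--     # to achieve a matrix full of 0s.
--     # - If one row is different, we can only achieve a 0s matrix
--     # if that row has an inverse pattern respect the others, i.e.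
--     #   01101                01101                            00000
--     #   10010 -> flip row -> 01101 -> flip columns with 1s -> 00000
--
--     # In order to being able to achieve all 0s,
--     # all the rows (or columns) must have the same
--     # pattern or the inverse pattern, i.e.
--     # pattern = 00010, inverse = 11101
--     # pattern = 11010, inverse = 00101
--     original_pattern = grid[0]
--     inverted_pattern = [1 - v for v in grid[0]]
--     rows = len(grid)
--     for r in range(1, rows):
--         if grid[r] != original_pattern and grid[r] != inverted_pattern:
--             return False
--
--     return True
-- ===== SOURCE B (Python) =====
-- def row_patterns(grid):
--     head = grid[0]
--     n = len(head)
--     for row in grid: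
--         if len(row) != n:
--             return False
--     if n == 0:
--         return True
--     # classify each row by its first column: same as head -> no flip, inverse -> flip
--     flips = []
--     for row in grid:
--         if row[0] == head[0]:
--             flips.append(False)
--         elif row[0] == 1 - head[0]:
--             flips.append(True)
--         else:
--             return False
--     # column-major verification of the remaining columns against the flip vector
--     for c in range(1, n):
--         hc = head[c]
--         for row, f in zip(grid, flips):
--             if row[c] != (1 - hc if f else hc):
--                 return False
--     return True
-- ===== Notes on version B (the rewrite author's own statement) =====
-- stated objective: alternative
-- what changed: Instead of comparing each whole row against two precomputed patterns, B checks row lengths, classifies each row from column 0 into a flip vector, then verifies the remaining columns column-major against the flip vector with early exit.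
import Mathlib
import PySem

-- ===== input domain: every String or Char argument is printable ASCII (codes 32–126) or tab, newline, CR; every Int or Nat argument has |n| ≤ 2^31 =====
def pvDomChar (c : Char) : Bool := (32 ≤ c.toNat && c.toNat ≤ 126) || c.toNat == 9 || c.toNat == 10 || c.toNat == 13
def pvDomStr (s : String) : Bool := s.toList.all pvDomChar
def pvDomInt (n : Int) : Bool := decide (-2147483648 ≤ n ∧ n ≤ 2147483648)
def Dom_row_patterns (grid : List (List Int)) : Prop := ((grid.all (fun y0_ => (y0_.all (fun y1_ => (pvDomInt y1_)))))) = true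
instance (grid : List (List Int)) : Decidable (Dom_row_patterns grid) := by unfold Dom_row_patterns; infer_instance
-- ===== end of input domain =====

-- B replaces the row-vs-two-patterns comparison by a flip vector read off column 0 plus a
-- column-major verification of the remaining columns; equivalence proved on nonempty grids
-- (A and B both raise IndexError at grid[0] on the empty grid).


-- ===== PORT A =====
-- the loop 'for r in range(1, rows): if grid[r] != original and != inverted: return False'
-- as structural recursion over grid[1:]
def aLoop (orig inv : List Int) : List (List Int) → Bool
  | [] => true
  | row :: rest => if row ≠ orig ∧ row ≠ inv then false else aLoop orig inv rest

def row_patterns (grid : List (List Int)) : Bool :=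
  let orig := grid.headD []          -- grid[0]; Pre_ excludes the empty grid (IndexError)
  let inv := orig.map (fun v => 1 - v)
  aLoop orig inv (grid.drop 1)

-- ===== PORT B =====
-- 'for row in grid: if len(row) != n: return False'
def bLenOk (n : Nat) : List (List Int) → Bool
  | [] => true
  | row :: rest => if row.length ≠ n then false else bLenOk n rest

-- classification loop building flips; the early 'return False' is modelled as none
def bFlips (h0 : Int) : List (List Int) → Option (List Bool)
  | [] => some []
  | row :: rest =>
    if row.headD 0 = h0 then (bFlips h0 rest).map (false :: ·)
    else if row.headD 0 = 1 - h0 then (bFlips h0 rest).map (true :: ·)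
    else none

-- inner loop 'for row, f in zip(grid, flips)'
def bInner (hc : Int) (c : Nat) : List (List Int × Bool) → Bool
  | [] => true
  | (row, f) :: rest =>
    if row.getD c 0 ≠ (if f then 1 - hc else hc) then false else bInner hc c rest

-- outer loop 'for c in range(1, n)'
def bColLoop (head : List Int) (pairs : List (List Int × Bool)) : List Nat → Bool
  | [] => true
  | c :: cs =>
    if bInner (head.getD c 0) c pairs then bColLoop head pairs cs else false

def row_patterns_alt (grid : List (List Int)) : Bool :=
  let head := grid.headD []          -- grid[0]; raises on the empty grid, same as A
  let n := head.length
  if bLenOk n grid then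
    if n = 0 then true
    else
      match bFlips (head.headD 0) grid with
      | none => false
      | some flips => bColLoop head (grid.zip flips) (List.range' 1 (n - 1))
  else false

-- ===== PRECONDITION & SPEC =====
-- Pre_ excludes exactly the empty grid, on which A (and B) raise IndexError at grid[0].
def Pre_row_patterns (grid : List (List Int)) : Prop := grid ≠ []
instance (grid : List (List Int)) : Decidable (Pre_row_patterns grid) := by unfold Pre_row_patterns; infer_instance
def pvWitness_row_patterns : List (List Int) := [[0, 1], [1, 0]]

def Spec_row_patterns (grid : List (List Int)) (out : Bool) : Prop := out = row_patterns_alt grid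
instance (grid : List (List Int)) (out : Bool) : Decidable (Spec_row_patterns grid out) := by unfold Spec_row_patterns; infer_instance

-- ===== CLAIM (what is proved, stated in full; the proofs are below) =====
def Claim_equal_row_patterns : Prop := ∀ (grid : List (List Int)), Dom_row_patterns grid → Pre_row_patterns grid → Spec_row_patterns grid (row_patterns grid)

-- ===== LEMMAS AND PROOFS =====

-- the common specification both programs decide per row
def okRow (h : List Int) (row : List Int) : Bool :=
  row == h || row == h.map (fun v => 1 - v)

theorem aLoop_eq_all (orig inv : List Int) (l : List (List Int)) :
    aLoop orig inv l = l.all (fun r => r == orig || r == inv) := by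
  induction l with
  | nil => rfl
  | cons row rest ih =>
    simp only [aLoop, List.all_cons, ih]
    by_cases h1 : row = orig <;> by_cases h2 : row = inv <;> simp [h1, h2]

theorem bLenOk_iff (n : Nat) (l : List (List Int)) :
    bLenOk n l = true ↔ ∀ r ∈ l, r.length = n := by
  induction l with
  | nil => simp [bLenOk]
  | cons row rest ih =>
    simp only [bLenOk]
    by_cases h : row.length = n <;> simp [h, ih]

theorem two_mul_ne_one (h0 : Int) : h0 ≠ 1 - h0 := by omega

theorem bFlips_some (h0 : Int) (l : List (List Int))
    (hall : ∀ r ∈ l, r.headD 0 = h0 ∨ r.headD 0 = 1 - h0) :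
    bFlips h0 l = some (l.map (fun r => decide (r.headD 0 = 1 - h0))) := by
  induction l with
  | nil => rfl
  | cons row rest ih =>
    have ih' := ih (fun r hr => hall r (List.mem_cons_of_mem _ hr))
    have h0' := hall row (List.mem_cons_self ..)
    simp only [bFlips, List.map_cons]
    by_cases h1 : row.headD 0 = h0
    · have hne : ¬ row.headD 0 = 1 - h0 := by omega
      rw [if_pos h1, ih', Option.map_some, decide_eq_false hne]
    · have h2 : row.headD 0 = 1 - h0 := h0'.resolve_left h1
      rw [if_neg h1, if_pos h2, ih', Option.map_some, decide_eq_true h2]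

theorem bFlips_none (h0 : Int) (l : List (List Int))
    (hbad : ∃ r ∈ l, ¬ r.headD 0 = h0 ∧ ¬ r.headD 0 = 1 - h0) :
    bFlips h0 l = none := by
  induction l with
  | nil => simp at hbad
  | cons row rest ih =>
    rcases hbad with ⟨r, hr, hb⟩
    rcases List.mem_cons.mp hr with rfl | hr'
    · simp only [bFlips]
      rw [if_neg hb.1, if_neg hb.2]
    · have hrest := ih ⟨r, hr', hb⟩
      simp only [bFlips]
      rw [hrest]
      split_ifs <;> rfl

theorem bInner_iff (hc : Int) (c : Nat) (pairs : List (List Int × Bool)) :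
    bInner hc c pairs = true ↔
      ∀ p ∈ pairs, p.1.getD c 0 = (if p.2 then 1 - hc else hc) := by
  induction pairs with
  | nil => simp [bInner]
  | cons p rest ih =>
    obtain ⟨row, f⟩ := p
    simp only [bInner]
    by_cases h : row.getD c 0 = (if f then 1 - hc else hc) <;> simp [ih]

theorem bColLoop_iff (head : List Int) (pairs : List (List Int × Bool)) (cs : List Nat) :
    bColLoop head pairs cs = true ↔
      ∀ c ∈ cs, bInner (head.getD c 0) c pairs = true := by
  induction cs with
  | nil => simp [bColLoop]
  | cons c rest ih =>
    simp only [bColLoop]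
    by_cases h : bInner (head.getD c 0) c pairs = true <;> simp [ih]

theorem zip_map_self {α β : Type} (l : List α) (f : α → β) :
    l.zip (l.map f) = l.map (fun x => (x, f x)) := by
  induction l with
  | nil => rfl
  | cons x xs ih => simp [ih]

-- a row equals a pattern iff lengths match and entries match via getD
theorem eq_iff_getD (row pat : List Int) (hr : row.length = pat.length) :
    row = pat ↔ ∀ c < pat.length, row.getD c 0 = pat.getD c 0 := by
  constructor
  · rintro rfl c _; rfl
  · intro h
    apply List.ext_getElem hr
    intro i h1 h2
    have := h i h2
    rwa [List.getD_eq_getElem _ _ h1, List.getD_eq_getElem _ _ h2] at this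

theorem getD_map_sub (h : List Int) (c : Nat) (hc : c < h.length) :
    (h.map (fun v => 1 - v)).getD c 0 = 1 - h.getD c 0 := by
  rw [List.getD_eq_getElem _ _ (by simpa using hc), List.getD_eq_getElem _ _ hc]
  simp

-- per-row equivalence, n > 0 case, given correct length and a classifiable first column
theorem row_char (h row : List Int) (hn : 0 < h.length) (hl : row.length = h.length)
    (h0 : row.headD 0 = h.headD 0 ∨ row.headD 0 = 1 - h.headD 0) :
    ((∀ c, 1 ≤ c → c < h.length →
        row.getD c 0 =
          (if decide (row.headD 0 = 1 - h.headD 0) then 1 - h.getD c 0 else h.getD c 0)) ↔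
      okRow h row = true) := by
  have hhead : h.headD 0 = h.getD 0 0 := by
    cases h with | nil => simp at hn | cons a t => rfl
  have hrow0 : 0 < row.length := hl ▸ hn
  have hrhead : row.headD 0 = row.getD 0 0 := by
    cases row with | nil => simp at hrow0 | cons a t => rfl
  have hmhead : (h.map (fun v => 1 - v)).headD 0 = 1 - h.headD 0 := by
    cases h with | nil => simp at hn | cons a t => rfl
  have hne : h.headD 0 ≠ 1 - h.headD 0 := two_mul_ne_one _
  by_cases hf : row.headD 0 = 1 - h.headD 0
  · simp only [hf, decide_true, if_true]
    have key : (∀ c, 1 ≤ c → c < h.length → row.getD c 0 = 1 - h.getD c 0) ↔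
        row = h.map (fun v => 1 - v) := by
      constructor
      · intro hall
        rw [eq_iff_getD _ _ (by simpa using hl)]
        intro c hcl
        have hcl' : c < h.length := by simpa using hcl
        rw [getD_map_sub _ _ hcl']
        rcases Nat.eq_zero_or_pos c with rfl | hc1
        · rw [← hrhead, ← hhead]; exact hf
        · exact hall c hc1 hcl'
      · intro hrm c hc1 hcl
        rw [hrm, getD_map_sub _ _ hcl]
    rw [key]
    constructor
    · intro hrm; simp [okRow, hrm]
    · intro hok
      rcases (by simpa [okRow] using hok : row = h ∨ row = h.map (fun v => 1 - v)) with
        rfl | hrm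
      · exact absurd hf hne
      · exact hrm
  · have h0' : row.headD 0 = h.headD 0 := h0.resolve_right hf
    simp only [decide_eq_false hf, Bool.false_eq_true, if_false]
    have key : (∀ c, 1 ≤ c → c < h.length → row.getD c 0 = h.getD c 0) ↔ row = h := by
      constructor
      · intro hall
        rw [eq_iff_getD _ _ hl]
        intro c hcl
        rcases Nat.eq_zero_or_pos c with rfl | hc1
        · rw [← hrhead, ← hhead]; exact h0'
        · exact hall c hc1 hcl
      · rintro rfl c _ _; rfl
    rw [key]
    constructor
    · intro hrm; simp [okRow, hrm]
    · intro hok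
      rcases (by simpa [okRow] using hok : row = h ∨ row = h.map (fun v => 1 - v)) with
        rfl | hrm
      · rfl
      · rw [hrm] at hf; exact absurd hmhead hf

-- B decides 'every row equals grid[0] or its inverse' over all rows
theorem alt_eq_all (h : List Int) (t : List (List Int)) :
    row_patterns_alt (h :: t) = (h :: t).all (okRow h) := by
  simp only [row_patterns_alt, List.headD_cons]
  by_cases hlen : bLenOk h.length (h :: t) = true
  case neg =>
    -- some row has the wrong length: it matches neither pattern
    rw [if_neg hlen]
    symm
    rw [List.all_eq_false]
    rw [bLenOk_iff] at hlen
    push Not at hlen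
    obtain ⟨r, hr, hrl⟩ := hlen
    refine ⟨r, hr, ?_⟩
    simp only [okRow, Bool.or_eq_true, beq_iff_eq, not_or]
    constructor
    · rintro rfl; exact hrl rfl
    · rintro rfl; exact hrl (by simp)
  case pos =>
    rw [if_pos hlen]
    have hlen' : ∀ r ∈ (h :: t), r.length = h.length := (bLenOk_iff _ _).mp hlen
    by_cases hn0 : h.length = 0
    · -- every row has length 0 and equals [] = grid[0]
      have hh : h = [] := List.length_eq_zero_iff.mp hn0
      rw [if_pos hn0]
      symm
      rw [List.all_eq_true]
      intro r hr
      have : r = [] := List.length_eq_zero_iff.mp (by rw [hlen' r hr, hn0])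
      simp [okRow, this, hh]
    · rw [if_neg hn0]
      have hnpos : 0 < h.length := Nat.pos_of_ne_zero hn0
      by_cases hfl : ∀ r ∈ (h :: t), r.headD 0 = h.headD 0 ∨ r.headD 0 = 1 - h.headD 0
      · rw [bFlips_some _ _ hfl]
        show bColLoop h
            ((h :: t).zip ((h :: t).map (fun r => decide (r.headD 0 = 1 - h.headD 0))))
            (List.range' 1 (h.length - 1)) = (h :: t).all (okRow h)
        rw [zip_map_self]
        rw [Bool.eq_iff_iff, bColLoop_iff, List.all_eq_true]
        constructor
        · intro hb r hr
          apply (row_char h r hnpos (hlen' r hr) (hfl r hr)).mp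
          intro c hc1 hcl
          have hmem : c ∈ List.range' 1 (h.length - 1) :=
            List.mem_range'_1.mpr ⟨hc1, by omega⟩
          have := (bInner_iff _ _ _).mp (hb c hmem)
            (r, decide (r.headD 0 = 1 - h.headD 0))
            (List.mem_map.mpr ⟨r, hr, rfl⟩)
          simpa using this
        · intro hall c hc
          rw [bInner_iff]
          intro p hp
          rw [List.mem_map] at hp
          obtain ⟨r, hr, rfl⟩ := hp
          have hc' := List.mem_range'_1.mp hc
          exact (row_char h r hnpos (hlen' r hr) (hfl r hr)).mpr
            (hall r hr) c hc'.1 (by omega)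
      · -- some row fails already in column 0: it matches neither pattern
        push Not at hfl
        obtain ⟨r, hr, hb1, hb2⟩ := hfl
        rw [bFlips_none _ _ ⟨r, hr, hb1, hb2⟩]
        symm
        rw [List.all_eq_false]
        refine ⟨r, hr, ?_⟩
        simp only [okRow, Bool.or_eq_true, beq_iff_eq, not_or]
        constructor
        · rintro rfl; exact hb1 rfl
        · rintro rfl
          apply hb2
          cases h with
          | nil => simp at hnpos
          | cons a t' => rfl

-- ===== VERDICT (by name: the statement is the Claim_ definition above) =====
theorem row_patterns_spec : Claim_equal_row_patterns := by
  intro grid _ hpre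
  unfold Spec_row_patterns
  obtain ⟨h, t, rfl⟩ : ∃ h t, grid = h :: t := by
    cases grid with
    | nil => exact absurd rfl hpre
    | cons h t => exact ⟨h, t, rfl⟩
  rw [alt_eq_all]
  simp only [row_patterns, List.headD_cons, List.drop_one, List.tail_cons,
    List.all_cons, aLoop_eq_all]
  have hh : okRow h h = true := by simp [okRow]
  rw [hh, Bool.true_and]
  rfl
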